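-- pv_equiv track=rewrite | github.com/huangyunict/euler_project | solutions/solution_98.py | largest_square
-- ===== SOURCE A (Python) =====
-- import math
--
-- def get_pattern(s: str) -> str:
--     mc = dict()
--     for c in s:
--         mc[c] = mc.get(c, 0) + 1
--     return '_'.join([str(x) for x in sorted(mc.values())])
--
-- def get_chart_digit_map(word: str, square: str) -> dict[str, str]:
--     d = dict()  # map from character to digit
--     assert len(word) == len(square)
--     for i in range(len(word)):
--         si = square[i]
--         wi = word[i]
--         if wi not in d:
--             d[wi] = si
--         else:
--             if d.get(wi) != si:
--                 return dict()
--     return d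
--
-- def check_squares(words: list[str], char_digit_map: dict[str, str]) -> bool:
--     cnt = 0
--     for word in words:
--         # Replace word to number.
--         digits = list()
--         for c in word:
--             assert c in char_digit_map
--             digits.append(char_digit_map[c])
--         # Check leading zeros.
--         if digits[0] == '0':
--             continue
--         # Check squares.
--         num = int(''.join(digits))
--         if math.isqrt(num) * math.isqrt(num) == num:
--             cnt += 1
--         if cnt >= 2:
--             return True
--     return False
--
-- def largest_square(words: list[str]) -> int:
--     max_word_len = max([len(x) for x in words])
--     max_root_len = (max_word_len + 1) // 2
--     # Patterns of input words: pattern -> anagram -> words.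
--     word_map = dict()
--     for word in words:
--         pattern = get_pattern(word)
--         if pattern not in word_map:
--             word_map[pattern] = dict()
--         anagram = ''.join(sorted(word))
--         if anagram not in word_map[pattern]:
--             word_map[pattern][anagram] = list()
--         word_map[pattern][anagram].append(word)
--     # Loop square numbers larger to litter and check squares.
--     for r in range(pow(10, max_root_len) - 1, 0, -1):
--         sq_str = str(r * r)
--         pattern = get_pattern(sq_str)
--         if pattern not in word_map:
--             continue
--         for anagram in word_map[pattern]:
--             if len(word_map[pattern][anagram]) < 2:
--                 continue
--             for i in range(len(word_map[pattern][anagram])):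
--                 word = word_map[pattern][anagram][i]
--                 char_digit_map = get_chart_digit_map(word, sq_str)
--                 if len(char_digit_map) == 0:
--                     continue
--                 if check_squares(word_map[pattern][anagram], char_digit_map):
--                     return int(sq_str)
--     return -1
-- ===== SOURCE B (Python) =====
-- import math
--
--
-- def get_pattern(s: str) -> str:
--     mc = dict()
--     for c in s:
--         mc[c] = mc.get(c, 0) + 1
--     return '_'.join([str(x) for x in sorted(mc.values())])
--
--
-- def get_chart_digit_map(word: str, square: str) -> dict[str, str]:
--     d = dict()  # map from character to digit
--     assert len(word) == len(square)
--     for i in range(len(word)):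
--         si = square[i]
--         wi = word[i]
--         if wi not in d:
--             d[wi] = si
--         else:
--             if d.get(wi) != si:
--                 return dict()
--     return d
--
--
-- def check_squares(words: list[str], char_digit_map: dict[str, str]) -> bool:
--     cnt = 0
--     for word in words:
--         # Replace word to number.
--         digits = list()
--         for c in word:
--             assert c in char_digit_map
--             digits.append(char_digit_map[c])
--         # Check leading zeros.
--         if digits[0] == '0':
--             continue
--         # Check squares.
--         num = int(''.join(digits))
--         if math.isqrt(num) * math.isqrt(num) == num:
--             cnt += 1
--         if cnt >= 2:
--             return True
--     return False
--
--
-- def _matches(grp: list[str], s: str) -> bool: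
--     # Some template word of the group maps consistently onto square string s
--     # and at least two group members become non-leading-zero squares under it.
--     for w in grp:
--         m = get_chart_digit_map(w, s)
--         if len(m) > 0 and check_squares(grp, m):
--             return True
--     return False
--
--
-- def largest_square(words: list[str]) -> int:
--     max_word_len = max([len(x) for x in words])
--     max_root_len = (max_word_len + 1) // 2
--     # Group the words by (letter pattern, sorted letters) in one flat dict.
--     groups = dict()
--     for w in words:
--         key = (get_pattern(w), ''.join(sorted(w)))
--         groups.setdefault(key, []).append(w)
--     # Index every candidate square by its digit pattern: pattern -> [(root, square string)].
--     # Only worth building when some anagram group has at least two words.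
--     sq_index = dict()
--     if any(len(grp) >= 2 for grp in groups.values()):
--         for r in range(1, 10 ** max_root_len):
--             s = str(r * r)
--             sq_index.setdefault(get_pattern(s), []).append((r, s))
--     # Walk the anagram groups; fetch each group's squares from the index and
--     # keep the largest root whose square matches; test only roots beating the best.
--     best_r, best_s = 0, ''
--     for (pattern, _), grp in groups.items():
--         if len(grp) < 2:
--             continue
--         for r, s in sq_index.get(pattern, []):
--             if r > best_r and _matches(grp, s):
--                 best_r, best_s = r, s
--     return int(best_s) if best_r else -1
-- ===== Notes on version B (the rewrite author's own statement) =====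
-- stated objective: alternative
-- what changed: B inverts A's traversal: it groups the words once into a flat (pattern, anagram)-keyed dict, then (only if some group has >=2 words) precomputes an index pattern -> [(root, square string)] over the same root range, walks the anagram groups looking their candidate squares up in the index, and keeps the largest matching root, testing only roots that beat the current best; A instead scans every square in descending order and looks the square's pattern up among the word groups, returning at the first hit.
import Mathlib
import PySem

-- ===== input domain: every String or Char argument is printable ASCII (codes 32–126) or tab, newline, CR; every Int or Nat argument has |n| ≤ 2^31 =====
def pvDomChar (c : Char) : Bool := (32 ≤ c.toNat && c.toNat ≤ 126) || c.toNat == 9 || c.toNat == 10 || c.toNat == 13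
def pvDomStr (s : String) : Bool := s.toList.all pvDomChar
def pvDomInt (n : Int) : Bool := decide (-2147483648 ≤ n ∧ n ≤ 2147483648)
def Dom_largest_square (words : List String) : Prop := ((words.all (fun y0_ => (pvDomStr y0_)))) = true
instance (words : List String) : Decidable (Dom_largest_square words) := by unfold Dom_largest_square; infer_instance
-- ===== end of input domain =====

-- B inverts A's traversal: instead of scanning every square downward and looking the square's pattern
-- up among the words, B precomputes an index pattern → [(root, square string)], walks the anagram
-- groups once, and keeps the largest matching root (testing only roots that beat the current best);
-- objective: alternative decomposition, same asymptotic cost.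

-- ===== PORT A =====
-- helpers shared by Source A and Source B (Source B carries the same helper code verbatim)

def get_pattern (s : String) : String :=
  let mc := s.toList.foldl (fun (d : PySem.Dict Char Int) c => d.insert c (d.getD c 0 + 1)) PySem.Dict.empty
  PySem.Str.join "_" ((PySem.List.sorted mc.values (fun x => x)).map PySem.Int.toStr)

-- get_chart_digit_map: the Python asserts len(word) == len(square) and every call site guarantees it
-- (equal patterns ⇒ equal lengths), so the index loop walks the two character lists in step (exact there).
def pvGcdmLoop (d : PySem.Dict Char Char) : List Char → List Char → PySem.Dict Char Char
  | [], _ => d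
  | _ :: _, [] => d            -- unreachable at call sites: the lengths are equal
  | w :: ws, s :: ss =>
    match d.get? w with
    | none => pvGcdmLoop (d.insert w s) ws ss
    | some v => if v = s then pvGcdmLoop d ws ss else PySem.Dict.empty

def get_chart_digit_map (word square : String) : PySem.Dict Char Char :=
  pvGcdmLoop PySem.Dict.empty word.toList square.toList

def pvCsLoop (m : PySem.Dict Char Char) : List String → Int → Bool
  | [], _ => false
  | w :: rest, cnt =>
    let digits := w.toList.foldl (fun acc c => acc ++ [m.getD c ' ']) []  -- 'assert c in char_digit_map' holds at call sites
    match digits with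
    | [] => pvCsLoop m rest cnt  -- unreachable at call sites (Python raises IndexError on an empty word)
    | d0 :: _ =>
      if d0 = '0' then pvCsLoop m rest cnt
      else
        let num := (PySem.Int.ofChars? digits).getD 0      -- int(''.join(digits)): digits are '0'..'9', so total
        let isq : Int := (Nat.sqrt num.toNat : Int)        -- math.isqrt(num), exact for 0 ≤ num
        let cnt2 := if isq * isq = num then cnt + 1 else cnt
        if 2 ≤ cnt2 then true else pvCsLoop m rest cnt2

def check_squares (ws : List String) (char_digit_map : PySem.Dict Char Char) : Bool :=
  pvCsLoop char_digit_map ws 0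

-- A's grouping loop body: word_map[pattern][anagram].append(word) on the nested dict
def pvStepA (wm : PySem.Dict String (PySem.Dict String (List String))) (word : String) :
    PySem.Dict String (PySem.Dict String (List String)) :=
  let pattern := get_pattern word
  let wm1 := if wm.contains pattern then wm else wm.insert pattern PySem.Dict.empty
  let anagram := String.ofList (PySem.List.sorted word.toList (fun c => c))
  let inner := wm1.getD pattern PySem.Dict.empty
  let inner1 := if inner.contains anagram then inner else inner.insert anagram []
  let inner2 := inner1.insert anagram (inner1.getD anagram [] ++ [word])
  wm1.insert pattern inner2

-- 'for i in range(len(...)): … return int(sq_str)' — innermost loop, as a Bool (the returned value is fixed)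
def pvTemplLoopA (lst : List String) (sq : String) : List Int → Bool
  | [] => false
  | i :: rest =>
    let word := PySem.List.pyGetD lst i ""
    let m := get_chart_digit_map word sq
    if m.size == 0 then pvTemplLoopA lst sq rest
    else if check_squares lst m then true
    else pvTemplLoopA lst sq rest

-- 'for anagram in word_map[pattern]:'
def pvAnagramLoopA (inner : PySem.Dict String (List String)) (sq : String) : List String → Bool
  | [] => false
  | a :: rest =>
    let lst := inner.getD a []
    if lst.length < 2 then pvAnagramLoopA inner sq rest
    else if pvTemplLoopA lst sq (PySem.List.pyRange 0 (lst.length : Int) 1) then true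
    else pvAnagramLoopA inner sq rest

-- 'for r in range(pow(10, max_root_len) - 1, 0, -1):'
def pvLoopA (wm : PySem.Dict String (PySem.Dict String (List String))) : List Int → Int
  | [] => -1
  | r :: rest =>
    let sq := PySem.Int.toStr (r * r)
    let pattern := get_pattern sq
    match wm.get? pattern with
    | none => pvLoopA wm rest
    | some inner =>
      if pvAnagramLoopA inner sq inner.keys then (PySem.Int.ofStr? sq).getD 0  -- int(sq_str), total on a digit string
      else pvLoopA wm rest

def largest_square (words : List String) : Int :=
  let maxWordLen := (PySem.List.max? (words.map PySem.Str.len) (fun x => x)).getD 0  -- max(...): ValueError on [] is outside Pre_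
  let maxRootLen := PySem.Int.floordiv (maxWordLen + 1) 2
  let wm := words.foldl pvStepA PySem.Dict.empty
  pvLoopA wm (PySem.List.pyRange ((10 : Int) ^ maxRootLen.toNat - 1) 0 (-1))

-- ===== PORT B =====

-- _matches(grp, s): 'for w in grp: if len(m) > 0 and check_squares(grp, m): return True'
def pvMatchesLoop (grp : List String) (s : String) : List String → Bool
  | [] => false
  | w :: rest =>
    let m := get_chart_digit_map w s
    if decide (0 < m.size) && check_squares grp m then true else pvMatchesLoop grp s rest

def pvMatches (grp : List String) (s : String) : Bool := pvMatchesLoop grp s grp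

-- square-index loop body: sq_index.setdefault(get_pattern(s), []).append((r, s))
def pvIdxStep (d : PySem.Dict String (List (Int × String))) (r : Int) :
    PySem.Dict String (List (Int × String)) :=
  let s := PySem.Int.toStr (r * r)
  let key := get_pattern s
  let d1 := d.setdefault key []
  d1.insert key (d1.getD key [] ++ [(r, s)])

-- B's grouping loop body: groups.setdefault(key, list()).append(word) on the flat dict
def pvStepB (g : PySem.Dict (String × String) (List String)) (word : String) :
    PySem.Dict (String × String) (List String) :=
  let key := (get_pattern word, String.ofList (PySem.List.sorted word.toList (fun c => c)))
  let g1 := g.setdefault key []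
  g1.insert key (g1.getD key [] ++ [word])

-- 'for r, s in sq_index.get(pattern, []): if r > best_r and _matches(grp, s): best_r, best_s = r, s'
def pvInnerB (grp : List String) : Int × String → List (Int × String) → Int × String
  | st, [] => st
  | st, rs :: t => pvInnerB grp (if decide (st.1 < rs.1) && pvMatches grp rs.2 then rs else st) t

-- 'for (pattern, _), grp in groups.items(): if len(grp) < 2: continue; …'
def pvOuterB (I : PySem.Dict String (List (Int × String))) :
    Int × String → List ((String × String) × List String) → Int × String
  | st, [] => st
  | st, kv :: t => pvOuterB I (if kv.2.length < 2 then st else pvInnerB kv.2 st (I.getD kv.1.1 [])) t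

def largest_square_alt (words : List String) : Int :=
  let maxWordLen := (PySem.List.max? (words.map PySem.Str.len) (fun x => x)).getD 0
  let maxRootLen := PySem.Int.floordiv (maxWordLen + 1) 2
  let groups := words.foldl pvStepB PySem.Dict.empty
  -- 'if any(len(grp) >= 2 for grp in groups.values()):' — the index is built only then
  let sqIndex := if groups.values.any (fun grp => decide (2 ≤ grp.length))
    then (PySem.List.pyRange 1 ((10 : Int) ^ maxRootLen.toNat) 1).foldl pvIdxStep PySem.Dict.empty
    else PySem.Dict.empty
  let st := pvOuterB sqIndex ((0 : Int), "") groups.items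
  if st.1 = 0 then -1 else (PySem.Int.ofStr? st.2).getD 0

-- ===== PRECONDITION & SPEC =====
-- Pre_ excludes only the empty list, on which the Python A raises ValueError (max of an empty sequence).
def Pre_largest_square (words : List String) : Prop := words ≠ []
instance (words : List String) : Decidable (Pre_largest_square words) := by
  unfold Pre_largest_square; infer_instance

def pvWitness_largest_square : List String := ["care", "race"]

def Spec_largest_square (words : List String) (out : Int) : Prop := out = largest_square_alt words
instance (words : List String) (out : Int) : Decidable (Spec_largest_square words out) := by unfold Spec_largest_square; infer_instance

-- ===== CLAIM (what is proved, stated in full; the proofs are below) =====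
def Claim_equal_largest_square : Prop := ∀ (words : List String), Dom_largest_square words → Pre_largest_square words → Spec_largest_square words (largest_square words)

-- ===== LEMMAS AND PROOFS =====

-- the qualification predicate both programs decide for a group and a square string
def pvQualifies (grp : List String) (sq : String) : Bool :=
  (grp.map (fun w => get_chart_digit_map w sq)).any (fun m => decide (0 < m.size) && check_squares grp m)

def pvCondA (wm : PySem.Dict String (PySem.Dict String (List String))) (sq : String) : Bool :=
  match wm.get? (get_pattern sq) with
  | none => false
  | some inner => pvAnagramLoopA inner sq inner.keys
def pvCondB (cands : List (String × List String)) (sq : String) : Bool :=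
  cands.any (fun c => c.1 == get_pattern sq && pvQualifies c.2 sq)

theorem pvMatchesLoop_eq_any (grp : List String) (s : String) (l : List String) :
    pvMatchesLoop grp s l
      = l.any (fun w =>
          decide (0 < (get_chart_digit_map w s).size) && check_squares grp (get_chart_digit_map w s)) := by
  induction l with
  | nil => rfl
  | cons w rest ih =>
    simp only [pvMatchesLoop, List.any_cons, ih]
    by_cases h : (decide (0 < (get_chart_digit_map w s).size) && check_squares grp (get_chart_digit_map w s)) = true <;>
      simp [h]

theorem pvMatches_eq_qualifies (grp : List String) (s : String) :
    pvMatches grp s = pvQualifies grp s := by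
  simp [pvMatches, pvMatchesLoop_eq_any, pvQualifies, List.any_map, Function.comp_def]

theorem pvTempl_eq_any (lst : List String) (sq : String) (idx : List Int) :
    pvTemplLoopA lst sq idx
      = idx.any (fun i =>
          let m := get_chart_digit_map (PySem.List.pyGetD lst i "") sq
          decide (0 < m.size) && check_squares lst m) := by
  induction idx with
  | nil => rfl
  | cons i rest ih =>
    simp only [pvTemplLoopA, List.any_cons, ih]
    rcases h : (get_chart_digit_map (PySem.List.pyGetD lst i "") sq).size with _ | n
    · simp
    · by_cases hc : check_squares lst (get_chart_digit_map (PySem.List.pyGetD lst i "") sq) <;> simp [hc]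

theorem pvAnagram_eq_any (inner : PySem.Dict String (List String)) (sq : String) (l : List String) :
    pvAnagramLoopA inner sq l
      = l.any (fun a =>
          let lst := inner.getD a []
          !decide (lst.length < 2) && pvTemplLoopA lst sq (PySem.List.pyRange 0 (lst.length : Int) 1)) := by
  induction l with
  | nil => rfl
  | cons a rest ih =>
    simp only [pvAnagramLoopA, List.any_cons, ih]
    by_cases h2 : (inner.getD a []).length < 2
    · simp [h2]
    · simp only [h2, decide_false, Bool.not_false, Bool.true_and]
      by_cases ht : pvTemplLoopA (inner.getD a []) sq (PySem.List.pyRange 0 ((inner.getD a []).length : Int) 1) <;>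
        simp [ht]

theorem pvLoopA_eq_find (wm : PySem.Dict String (PySem.Dict String (List String))) (l : List Int) :
    pvLoopA wm l
      = match l.find? (fun r => pvCondA wm (PySem.Int.toStr (r * r))) with
        | some r => (PySem.Int.ofStr? (PySem.Int.toStr (r * r))).getD 0
        | none => -1 := by
  induction l with
  | nil => rfl
  | cons r rest ih =>
    simp only [pvLoopA, List.find?_cons, pvCondA]
    rcases h : wm.get? (get_pattern (PySem.Int.toStr (r * r))) with _ | inner
    · simpa [h] using ih
    · by_cases ha : pvAnagramLoopA inner (PySem.Int.toStr (r * r)) inner.keys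
      · simp [ha]
      · simpa [ha] using ih

theorem pvTempl_eq_qualifies (lst : List String) (sq : String) :
    pvTemplLoopA lst sq (PySem.List.pyRange 0 (lst.length : Int) 1) = pvQualifies lst sq := by
  rw [pvTempl_eq_any]
  rw [show (fun i =>
        let m := get_chart_digit_map (PySem.List.pyGetD lst i "") sq
        decide (0 < m.size) && check_squares lst m)
      = ((fun w => let m := get_chart_digit_map w sq; decide (0 < m.size) && check_squares lst m) ∘
          (fun i => PySem.List.pyGetD lst i "")) from rfl]
  rw [← List.any_map, PySem.List.map_pyGetD_pyRange_zero']
  simp [pvQualifies, List.any_map, Function.comp_def]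

def pvInv (wm : PySem.Dict String (PySem.Dict String (List String)))
    (g : PySem.Dict (String × String) (List String)) : Prop :=
  wm.keys.Nodup ∧ (∀ p inner, wm.get? p = some inner → inner.keys.Nodup) ∧ g.keys.Nodup ∧
  ∀ p a, (wm.get? p).bind (fun i => i.get? a) = g.get? (p, a)

theorem pvInv_empty : pvInv PySem.Dict.empty PySem.Dict.empty := by
  unfold pvInv
  refine ⟨?_, ?_, ?_, ?_⟩
  · exact PySem.Dict.nodup_keys_empty
  · intro p inner h; simp [PySem.Dict.get?_empty] at h
  · exact PySem.Dict.nodup_keys_empty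
  · intro p a; simp [PySem.Dict.get?_empty]

theorem pvInv_step (wm : PySem.Dict String (PySem.Dict String (List String)))
    (g : PySem.Dict (String × String) (List String)) (w : String) (h : pvInv wm g) :
    pvInv (pvStepA wm w) (pvStepB g w) := by
  unfold pvInv at h ⊢
  obtain ⟨h1, h2, h3, h4⟩ := h
  set p := get_pattern w with hp
  set an := String.ofList (PySem.List.sorted w.toList (fun c => c)) with han
  set wm1 := if wm.contains p then wm else wm.insert p PySem.Dict.empty with hwm1
  set inner := wm1.getD p PySem.Dict.empty with hinner
  set inner1 := if inner.contains an then inner else inner.insert an [] with hinner1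
  set inner2 := inner1.insert an (inner1.getD an [] ++ [w]) with hinner2
  have hstepA : pvStepA wm w = wm1.insert p inner2 := rfl
  have hstepB : pvStepB g w = (g.setdefault (p, an) []).insert (p, an)
      ((g.setdefault (p, an) []).getD (p, an) [] ++ [w]) := rfl
  have hwm1get : ∀ q, wm1.get? q = if q = p then some ((wm.get? p).getD PySem.Dict.empty) else wm.get? q := by
    intro q
    by_cases hc : wm.contains p
    · have hw : wm1 = wm := by rw [hwm1, if_pos hc]
      rw [hw]
      by_cases hq : q = p
      · rw [hq, if_pos rfl]
        rcases hg : wm.get? p with _ | i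
        · rw [PySem.Dict.contains_eq_isSome_get?, hg] at hc; simp at hc
        · simp
      · rw [if_neg hq]
    · have hw : wm1 = wm.insert p PySem.Dict.empty := by rw [hwm1, if_neg hc]
      have hnone : wm.get? p = none := by
        rw [PySem.Dict.contains_eq_isSome_get?] at hc
        rcases hg : wm.get? p with _ | i
        · rfl
        · rw [hg] at hc; simp at hc
      rw [hw, PySem.Dict.get?_insert]
      by_cases hq : q = p
      · rw [if_pos hq, if_pos hq, hnone]; rfl
      · rw [if_neg hq, if_neg hq]
  have hinner_eq : inner = (wm.get? p).getD PySem.Dict.empty := by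
    rw [hinner, PySem.Dict.getD_eq_get?_getD, hwm1get p, if_pos rfl]; rfl
  have hinnernd : inner.keys.Nodup := by
    rw [hinner_eq]
    rcases hg : wm.get? p with _ | j
    · exact PySem.Dict.nodup_keys_empty
    · exact h2 p j hg
  have hinner_bind : ∀ b, inner.get? b = (wm.get? p).bind (fun i => i.get? b) := by
    intro b
    rw [hinner_eq]
    rcases hg : wm.get? p with _ | j
    · exact PySem.Dict.get?_empty b
    · rfl
  have hinner2get : ∀ b, inner2.get? b
      = if b = an then some ((inner.get? an).getD [] ++ [w]) else inner.get? b := by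
    intro b
    rw [hinner2, PySem.Dict.get?_insert]
    by_cases hb : b = an
    · rw [if_pos hb, if_pos hb]
      have hd : inner1.getD an [] = (inner.get? an).getD [] := by
        by_cases hc : inner.contains an
        · rw [hinner1, if_pos hc, PySem.Dict.getD_eq_get?_getD]
        · have hnone : inner.get? an = none := by
            rw [PySem.Dict.contains_eq_isSome_get?] at hc
            rcases hg : inner.get? an with _ | i
            · rfl
            · rw [hg] at hc; simp at hc
          rw [hinner1, if_neg hc, PySem.Dict.getD_insert_self, hnone]; rfl
      rw [hd]
    · have hb1 : inner1.get? b = inner.get? b := by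
        by_cases hc : inner.contains an
        · rw [hinner1, if_pos hc]
        · rw [hinner1, if_neg hc, PySem.Dict.get?_insert, if_neg hb]
      rw [if_neg hb, if_neg hb, hb1]
  have hg1getD : (g.setdefault (p, an) []).getD (p, an) [] = (g.get? (p, an)).getD [] := by
    rw [PySem.Dict.getD_setdefault_self, PySem.Dict.getD_eq_get?_getD]
  have hBget : ∀ q, (pvStepB g w).get? q
      = if q = (p, an) then some ((g.get? (p, an)).getD [] ++ [w]) else g.get? q := by
    intro q
    rw [hstepB, PySem.Dict.get?_insert]
    by_cases hq : q = (p, an)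
    · rw [if_pos hq, if_pos hq, hg1getD]
    · rw [if_neg hq, if_neg hq, PySem.Dict.get?_setdefault_of_ne _ _ hq]
  have hAget : ∀ q, (pvStepA wm w).get? q = if q = p then some inner2 else wm.get? q := by
    intro q
    rw [hstepA, PySem.Dict.get?_insert]
    by_cases hq : q = p
    · rw [if_pos hq, if_pos hq]
    · rw [if_neg hq, if_neg hq, hwm1get q, if_neg hq]
  refine ⟨?_, ?_, ?_, ?_⟩
  · rw [hstepA]
    apply PySem.Dict.nodup_keys_insert
    by_cases hc : wm.contains p
    · rw [hwm1, if_pos hc]; exact h1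
    · rw [hwm1, if_neg hc]; exact PySem.Dict.nodup_keys_insert _ _ _ h1
  · intro q i hq
    rw [hAget q] at hq
    by_cases hqp : q = p
    · rw [if_pos hqp] at hq
      have hi : i = inner2 := by injection hq with hv; exact hv.symm
      subst hi
      have h1nd : inner1.keys.Nodup := by
        by_cases hc : inner.contains an
        · rw [hinner1, if_pos hc]; exact hinnernd
        · rw [hinner1, if_neg hc]; exact PySem.Dict.nodup_keys_insert _ _ _ hinnernd
      rw [hinner2]; exact PySem.Dict.nodup_keys_insert _ _ _ h1nd
    · rw [if_neg hqp] at hq; exact h2 q i hq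
  · rw [hstepB]
    apply PySem.Dict.nodup_keys_insert
    by_cases hc : g.contains (p, an)
    · rw [PySem.Dict.setdefault_of_contains _ _ hc]; exact h3
    · rw [PySem.Dict.setdefault_of_not_contains _ _ (by simpa using hc)]
      exact PySem.Dict.nodup_keys_insert _ _ _ h3
  · intro q a
    rw [hAget q, hBget (q, a)]
    by_cases hqp : q = p
    · by_cases hqa : a = an
      · rw [hqp, hqa, if_pos rfl, if_pos rfl]
        simp only [Option.bind_some]
        rw [hinner2get an, if_pos rfl, hinner_bind an, h4 p an]
      · rw [hqp, if_pos rfl, if_neg (by simp [hqa])]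
        simp only [Option.bind_some]
        rw [hinner2get a, if_neg hqa, hinner_bind a, h4 p a]
    · rw [if_neg hqp, if_neg (by simp [hqp]), h4 q a]

theorem pvCond_eq (wm : PySem.Dict String (PySem.Dict String (List String)))
    (g : PySem.Dict (String × String) (List String)) (h : pvInv wm g) (sq : String) :
    pvCondA wm sq
      = pvCondB ((g.items.filter (fun kv => decide (2 ≤ kv.2.length))).map (fun kv => (kv.1.1, kv.2))) sq := by
  obtain ⟨h1, h2, h3, h4⟩ := h
  rw [Bool.eq_iff_iff]
  unfold pvCondA pvCondB
  constructor
  · intro hA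
    rcases hwm : wm.get? (get_pattern sq) with _ | inner
    · rw [hwm] at hA; simp at hA
    · rw [hwm] at hA
      replace hA : pvAnagramLoopA inner sq inner.keys = true := hA
      rw [pvAnagram_eq_any] at hA
      simp only [List.any_eq_true] at hA
      obtain ⟨a, ha_mem, ha⟩ := hA
      simp only [Bool.and_eq_true, Bool.not_eq_true', decide_eq_false_iff_not, Nat.not_lt] at ha
      obtain ⟨hlen, htempl⟩ := ha
      rw [pvTempl_eq_qualifies] at htempl
      have hnd : inner.keys.Nodup := h2 _ _ hwm
      have hcont : inner.contains a = true := (PySem.Dict.contains_iff_mem_keys inner a).mpr ha_mem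
      have hsome : inner.get? a = some (inner.getD a []) := by
        rw [PySem.Dict.contains_eq_isSome_get?] at hcont
        rcases hg : inner.get? a with _ | lst
        · rw [hg] at hcont; simp at hcont
        · rw [PySem.Dict.getD_eq_get?_getD, hg]; rfl
      have hgget : g.get? (get_pattern sq, a) = some (inner.getD a []) := by
        rw [← h4, hwm]; exact hsome
      have hmemg : ((get_pattern sq, a), inner.getD a []) ∈ g.items :=
        (PySem.Dict.get?_eq_some_iff_mem_items _ _ _ h3).mp hgget
      simp only [List.any_eq_true, List.mem_map, List.mem_filter]
      refine ⟨(get_pattern sq, inner.getD a []), ⟨((get_pattern sq, a), inner.getD a []), ⟨hmemg, by simpa using hlen⟩, rfl⟩, ?_⟩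
      simp [htempl]
  · intro hB
    simp only [List.any_eq_true, List.mem_map, List.mem_filter] at hB
    obtain ⟨c, ⟨kv, ⟨hkv_mem, hkvlen⟩, hc_eq⟩, hc⟩ := hB
    subst hc_eq
    simp only [Bool.and_eq_true, beq_iff_eq] at hc
    obtain ⟨hpe, hq⟩ := hc
    have hg : g.get? kv.1 = some kv.2 :=
      (PySem.Dict.get?_eq_some_iff_mem_items _ _ _ h3).mpr (by simpa using hkv_mem)
    have hg' : g.get? (get_pattern sq, kv.1.2) = some kv.2 := by
      have : kv.1 = (get_pattern sq, kv.1.2) := by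
        rcases kv with ⟨⟨x, y⟩, v⟩; simp at hpe ⊢; exact hpe
      rw [← this]; exact hg
    have hbind := h4 (get_pattern sq) kv.1.2
    rw [hg'] at hbind
    rcases hwm : wm.get? (get_pattern sq) with _ | inner
    · rw [hwm] at hbind; simp at hbind
    · rw [hwm] at hbind
      replace hbind : inner.get? kv.1.2 = some kv.2 := hbind
      show pvAnagramLoopA inner sq inner.keys = true
      rw [pvAnagram_eq_any]
      simp only [List.any_eq_true]
      have hmemk : kv.1.2 ∈ inner.keys := by
        have : inner.contains kv.1.2 = true := by
          rw [PySem.Dict.contains_eq_isSome_get?, hbind]; rfl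
        exact (PySem.Dict.contains_iff_mem_keys inner kv.1.2).mp this
      have hgetD : inner.getD kv.1.2 [] = kv.2 := by
        rw [PySem.Dict.getD_eq_get?_getD, hbind]; rfl
      refine ⟨kv.1.2, hmemk, ?_⟩
      simp only [hgetD, pvTempl_eq_qualifies]
      have : ¬ kv.2.length < 2 := by simp at hkvlen; omega
      simp [this, hq]

theorem pvInv_build (ws : List String) (wm : PySem.Dict String (PySem.Dict String (List String)))
    (g : PySem.Dict (String × String) (List String)) (h : pvInv wm g) :
    pvInv (ws.foldl pvStepA wm) (ws.foldl pvStepB g) := by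
  induction ws generalizing wm g with
  | nil => exact h
  | cons w t ih => exact ih _ _ (pvInv_step wm g w h)

-- ---- the square index: what one step, then a whole fold, stores under each pattern ----

theorem pvIdxStep_getD (d : PySem.Dict String (List (Int × String))) (r : Int) (p : String) :
    (pvIdxStep d r).getD p []
      = if get_pattern (PySem.Int.toStr (r * r)) = p
        then d.getD p [] ++ [(r, PySem.Int.toStr (r * r))] else d.getD p [] := by
  unfold pvIdxStep
  rw [PySem.Dict.getD_insert]
  by_cases hp : p = get_pattern (PySem.Int.toStr (r * r))
  · rw [if_pos hp, if_pos hp.symm, hp, PySem.Dict.getD_setdefault_self]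
  · rw [if_neg hp, if_neg (fun h => hp h.symm), PySem.Dict.getD_eq_get?_getD,
      PySem.Dict.get?_setdefault_of_ne _ _ hp, ← PySem.Dict.getD_eq_get?_getD]

theorem pvIdx_getD (l : List Int) (d : PySem.Dict String (List (Int × String))) (p : String) :
    (l.foldl pvIdxStep d).getD p []
      = d.getD p []
        ++ (l.map (fun r => (r, PySem.Int.toStr (r * r)))).filter
             (fun rs => decide (get_pattern rs.2 = p)) := by
  induction l generalizing d with
  | nil => simp
  | cons r t ih =>
    simp only [List.foldl_cons, List.map_cons, List.filter_cons, ih, pvIdxStep_getD]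
    by_cases hp : get_pattern (PySem.Int.toStr (r * r)) = p
    · simp [hp]
    · simp [hp]

theorem pvMem_idx (N : Int) (p : String) (r : Int) (s : String) :
    (r, s) ∈ ((PySem.List.pyRange 1 N 1).foldl pvIdxStep PySem.Dict.empty).getD p []
      ↔ r ∈ PySem.List.pyRange 1 N 1 ∧ s = PySem.Int.toStr (r * r) ∧ get_pattern s = p := by
  rw [pvIdx_getD]
  simp only [PySem.Dict.getD_empty, List.nil_append, List.mem_filter, List.mem_map,
    decide_eq_true_eq]
  constructor
  · rintro ⟨⟨r', hr', heq⟩, hp⟩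
    have h1 : r' = r := congrArg Prod.fst heq
    have h2 : PySem.Int.toStr (r' * r') = s := congrArg Prod.snd heq
    subst h1
    exact ⟨hr', h2.symm, hp⟩
  · rintro ⟨hr, hs, hp⟩
    exact ⟨⟨r, hr, by rw [hs]⟩, hp⟩

-- ---- the argmax accumulator: monotone, returns the initial state or a qualifying item, dominates them ----

theorem pvInnerB_fst_le (grp : List String) (st : Int × String) (ps : List (Int × String)) :
    st.1 ≤ (pvInnerB grp st ps).1 := by
  induction ps generalizing st with
  | nil => exact le_refl _
  | cons rs t ih =>
    simp only [pvInnerB]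
    by_cases hc : (decide (st.1 < rs.1) && pvMatches grp rs.2) = true
    · rw [if_pos hc]
      have hlt : st.1 < rs.1 := of_decide_eq_true ((Bool.and_eq_true _ _).mp hc).1
      exact le_trans (le_of_lt hlt) (ih rs)
    · rw [if_neg hc]; exact ih st

theorem pvInnerB_cases (grp : List String) (st : Int × String) (ps : List (Int × String)) :
    pvInnerB grp st ps = st ∨ ∃ rs ∈ ps, pvMatches grp rs.2 = true ∧ pvInnerB grp st ps = rs := by
  induction ps generalizing st with
  | nil => exact Or.inl rfl
  | cons rs t ih =>
    simp only [pvInnerB]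
    by_cases hc : (decide (st.1 < rs.1) && pvMatches grp rs.2) = true
    · rw [if_pos hc]
      rcases ih rs with h | ⟨rs', hmem, hm, heq⟩
      · exact Or.inr ⟨rs, List.mem_cons_self .., ((Bool.and_eq_true _ _).mp hc).2, h⟩
      · exact Or.inr ⟨rs', List.mem_cons_of_mem _ hmem, hm, heq⟩
    · rw [if_neg hc]
      rcases ih st with h | ⟨rs', hmem, hm, heq⟩
      · exact Or.inl h
      · exact Or.inr ⟨rs', List.mem_cons_of_mem _ hmem, hm, heq⟩

theorem pvInnerB_max (grp : List String) (st : Int × String) (ps : List (Int × String)) :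
    ∀ rs ∈ ps, pvMatches grp rs.2 = true → rs.1 ≤ (pvInnerB grp st ps).1 := by
  induction ps generalizing st with
  | nil => intro rs h; cases h
  | cons hd t ih =>
    intro rs hmem hm
    simp only [pvInnerB]
    rcases List.mem_cons.mp hmem with h | h
    · subst h
      by_cases hlt : st.1 < rs.1
      · rw [if_pos (by simp [hlt, hm])]
        exact pvInnerB_fst_le grp rs t
      · by_cases hc : (decide (st.1 < rs.1) && pvMatches grp rs.2) = true
        · rw [if_pos hc]; exact pvInnerB_fst_le grp rs t
        · rw [if_neg hc]
          exact le_trans (le_of_not_gt hlt) (pvInnerB_fst_le grp st t)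
    · by_cases hc : (decide (st.1 < hd.1) && pvMatches grp hd.2) = true
      · rw [if_pos hc]; exact ih hd rs h hm
      · rw [if_neg hc]; exact ih st rs h hm

def pvQI (items : List ((String × String) × List String))
    (I : PySem.Dict String (List (Int × String))) (rs : Int × String) : Prop :=
  ∃ kv ∈ items, 2 ≤ kv.2.length ∧ rs ∈ I.getD kv.1.1 [] ∧ pvMatches kv.2 rs.2 = true

theorem pvOuterB_fst_le (I : PySem.Dict String (List (Int × String))) (st : Int × String)
    (items : List ((String × String) × List String)) : st.1 ≤ (pvOuterB I st items).1 := by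
  induction items generalizing st with
  | nil => exact le_refl _
  | cons kv t ih =>
    simp only [pvOuterB]
    by_cases h2 : kv.2.length < 2
    · rw [if_pos h2]; exact ih st
    · rw [if_neg h2]
      exact le_trans (pvInnerB_fst_le kv.2 st _) (ih _)

theorem pvOuterB_cases (I : PySem.Dict String (List (Int × String))) (st : Int × String)
    (items : List ((String × String) × List String)) :
    pvOuterB I st items = st ∨ ∃ rs, pvQI items I rs ∧ pvOuterB I st items = rs := by
  induction items generalizing st with
  | nil => exact Or.inl rfl
  | cons kv t ih =>
    simp only [pvOuterB]
    by_cases h2 : kv.2.length < 2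
    · rw [if_pos h2]
      rcases ih st with h | ⟨rs, ⟨kv', hmem, hq⟩, heq⟩
      · exact Or.inl h
      · exact Or.inr ⟨rs, ⟨kv', List.mem_cons_of_mem _ hmem, hq⟩, heq⟩
    · rw [if_neg h2]
      rcases ih (pvInnerB kv.2 st (I.getD kv.1.1 [])) with h | ⟨rs, ⟨kv', hmem, hq⟩, heq⟩
      · rcases pvInnerB_cases kv.2 st (I.getD kv.1.1 []) with h' | ⟨rs, hmem, hm, heq⟩
        · exact Or.inl (h.trans h')
        · exact Or.inr ⟨rs, ⟨kv, List.mem_cons_self .., by omega, hmem, hm⟩, h.trans heq⟩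
      · exact Or.inr ⟨rs, ⟨kv', List.mem_cons_of_mem _ hmem, hq⟩, heq⟩

theorem pvOuterB_max (I : PySem.Dict String (List (Int × String))) (st : Int × String)
    (items : List ((String × String) × List String)) :
    ∀ rs, pvQI items I rs → rs.1 ≤ (pvOuterB I st items).1 := by
  induction items generalizing st with
  | nil => rintro rs ⟨kv, hmem, _⟩; cases hmem
  | cons kv t ih =>
    rintro rs ⟨kv', hmem, hlen, hin, hm⟩
    simp only [pvOuterB]
    rcases List.mem_cons.mp hmem with h | h
    · subst h
      rw [if_neg (by omega)]
      exact le_trans (pvInnerB_max kv'.2 st _ rs hin hm) (pvOuterB_fst_le I _ t)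
    · by_cases h2 : kv.2.length < 2
      · rw [if_pos h2]; exact ih st rs ⟨kv', h, hlen, hin, hm⟩
      · rw [if_neg h2]; exact ih _ rs ⟨kv', h, hlen, hin, hm⟩

theorem pvQI_iff (g : PySem.Dict (String × String) (List String)) (N : Int) (rs : Int × String) :
    pvQI g.items ((PySem.List.pyRange 1 N 1).foldl pvIdxStep PySem.Dict.empty) rs
      ↔ rs.1 ∈ PySem.List.pyRange 1 N 1 ∧ rs.2 = PySem.Int.toStr (rs.1 * rs.1) ∧
          pvCondB ((g.items.filter (fun kv => decide (2 ≤ kv.2.length))).map (fun kv => (kv.1.1, kv.2))) rs.2 = true := by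
  constructor
  · rintro ⟨kv, hmem, hlen, hin, hm⟩
    obtain ⟨hr, hs, hp⟩ := (pvMem_idx N kv.1.1 rs.1 rs.2).mp hin
    refine ⟨hr, hs, ?_⟩
    unfold pvCondB
    simp only [List.any_eq_true, List.mem_map, List.mem_filter]
    exact ⟨(kv.1.1, kv.2), ⟨kv, ⟨hmem, by simpa using hlen⟩, rfl⟩,
      by simp [hp, ← pvMatches_eq_qualifies, hm]⟩
  · rintro ⟨hr, hs, hc⟩
    unfold pvCondB at hc
    simp only [List.any_eq_true, List.mem_map, List.mem_filter] at hc
    obtain ⟨c, ⟨kv, ⟨hmem, hlen⟩, hceq⟩, hcond⟩ := hc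
    subst hceq
    simp only [Bool.and_eq_true, beq_iff_eq] at hcond
    refine ⟨kv, hmem, by simpa using hlen, ?_, ?_⟩
    · exact (pvMem_idx N kv.1.1 rs.1 rs.2).mpr ⟨hr, hs, hcond.1.symm⟩
    · rw [pvMatches_eq_qualifies]; exact hcond.2

-- ---- the descending scan of A: first hit on the reversed ascending range is the maximum hit ----

theorem pvFind_rev_none {l : List Int} {p : Int → Bool}
    (h : l.reverse.find? p = none) : ∀ x ∈ l, p x = false := by
  intro x hx
  have := List.find?_eq_none.mp h x (List.mem_reverse.mpr hx)
  simpa using this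

theorem pvFind_rev_some {l : List Int} {p : Int → Bool} (hs : l.Pairwise (· < ·)) {r : Int}
    (h : l.reverse.find? p = some r) : p r = true ∧ r ∈ l ∧ ∀ x ∈ l, p x = true → x ≤ r := by
  induction l with
  | nil => simp at h
  | cons a t ih =>
    obtain ⟨ha, ht⟩ := List.pairwise_cons.mp hs
    rw [List.reverse_cons, List.find?_append] at h
    rcases hf : t.reverse.find? p with _ | r'
    · rw [hf] at h
      replace h : List.find? p [a] = some r := h
      cases hpa : p a with
      | false => simp [List.find?, hpa] at h
      | true =>
        have hra : a = r := by simpa [List.find?, hpa] using h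
        subst hra
        refine ⟨hpa, List.mem_cons_self .., ?_⟩
        intro x hx hpx
        rcases List.mem_cons.mp hx with rfl | hx'
        · exact le_refl _
        · exact absurd hpx (by simp [pvFind_rev_none hf x hx'])
    · rw [hf] at h
      replace h : some r' = some r := h
      obtain rfl : r' = r := by injection h
      obtain ⟨hp, hmem, hmax⟩ := ih ht hf
      refine ⟨hp, List.mem_cons_of_mem _ hmem, ?_⟩
      intro x hx hpx
      rcases List.mem_cons.mp hx with rfl | hx'
      · exact le_of_lt (ha _ hmem)
      · exact hmax x hx' hpx

-- ===== VERDICT (by name: the statement is the Claim_ definition above) =====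
theorem largest_square_spec : Claim_equal_largest_square := by
  intro words _ _
  show largest_square words = largest_square_alt words
  have hinv := pvInv_build words PySem.Dict.empty PySem.Dict.empty pvInv_empty
  set wm := words.foldl pvStepA PySem.Dict.empty with hwm
  set g := words.foldl pvStepB PySem.Dict.empty with hg
  set cands := (g.items.filter (fun kv => decide (2 ≤ kv.2.length))).map (fun kv => (kv.1.1, kv.2)) with hcands
  set N := (10 : Int) ^ (PySem.Int.floordiv (((PySem.List.max? (words.map PySem.Str.len) (fun x => x)).getD 0) + 1) 2).toNat with hN
  set I := (if g.values.any (fun grp => decide (2 ≤ grp.length))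
    then (PySem.List.pyRange 1 N 1).foldl pvIdxStep PySem.Dict.empty
    else PySem.Dict.empty) with hI
  set st := pvOuterB I ((0 : Int), "") g.items with hst
  have hA : largest_square words = pvLoopA wm (PySem.List.pyRange (N - 1) 0 (-1)) := rfl
  have hB : largest_square_alt words = (if st.1 = 0 then -1 else (PySem.Int.ofStr? st.2).getD 0) := rfl
  have hrange : PySem.List.pyRange (N - 1) 0 (-1) = (PySem.List.pyRange 1 N 1).reverse := by
    rw [PySem.List.pyRange_neg_one_eq_reverse]; norm_num
  have hcondeq : ∀ sq, pvCondA wm sq = pvCondB cands sq := fun sq => pvCond_eq wm g hinv sq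
  rw [hA, hB, pvLoopA_eq_find, hrange]
  by_cases hb : g.values.any (fun grp => decide (2 ≤ grp.length)) = true
  · -- some anagram group has at least two words: the index is the real one
    have hIe : I = (PySem.List.pyRange 1 N 1).foldl pvIdxStep PySem.Dict.empty := by
      rw [hI, if_pos hb]
    rcases hf : (PySem.List.pyRange 1 N 1).reverse.find? (fun r => pvCondA wm (PySem.Int.toStr (r * r))) with _ | r0
    · -- no square qualifies: A returns -1, B's accumulator never moves
      have hnone := pvFind_rev_none hf
      have hstval : st = ((0 : Int), "") := by
        rcases pvOuterB_cases I ((0 : Int), "") g.items with h | ⟨rs, hq, heq⟩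
        · exact h
        · rw [hIe] at hq
          obtain ⟨hr, hs, hc⟩ := (pvQI_iff g N rs).mp hq
          have := hnone rs.1 hr
          rw [← hs] at this
          rw [hcondeq] at this
          rw [this] at hc
          cases hc
      rw [hstval]
      simp
    · -- r0 is the first qualifying root in descending order, i.e. the largest one
      have hsorted : (PySem.List.pyRange 1 N 1).Pairwise (· < ·) := PySem.List.pairwise_lt_pyRange_one 1 N
      obtain ⟨hp, hmem, hmax⟩ := pvFind_rev_some hsorted hf
      have hr0pos : 1 ≤ r0 := ((PySem.List.mem_pyRange_one).mp hmem).1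
      have hq0 : pvQI g.items I (r0, PySem.Int.toStr (r0 * r0)) := by
        rw [hIe]
        apply (pvQI_iff g N _).mpr
        refine ⟨hmem, rfl, ?_⟩
        rw [← hcondeq]
        exact hp
      have hle : r0 ≤ st.1 := pvOuterB_max I ((0 : Int), "") g.items _ hq0
      rcases pvOuterB_cases I ((0 : Int), "") g.items with h | ⟨rs, hq, heq⟩
      · exfalso
        rw [← hst] at h
        rw [h] at hle
        simp at hle
        omega
      · rw [hIe] at hq
        obtain ⟨hr, hs, hc⟩ := (pvQI_iff g N rs).mp hq
        have hcond : pvCondA wm (PySem.Int.toStr (rs.1 * rs.1)) = true := by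
          rw [hcondeq]; rw [← hs]; exact hc
        have hler : rs.1 ≤ r0 := hmax rs.1 hr hcond
        rw [← hst] at heq
        rw [heq] at hle
        have hreq : rs.1 = r0 := le_antisymm hler hle
        have hne : st.1 ≠ 0 := by rw [heq, hreq]; omega
        show (PySem.Int.ofStr? (PySem.Int.toStr (r0 * r0))).getD 0
            = if st.1 = 0 then -1 else (PySem.Int.ofStr? st.2).getD 0
        rw [if_neg hne, heq, hs, hreq]
  · -- every anagram group is a singleton: no candidate pair on either side
    have hall : ∀ v ∈ g.values, ¬ 2 ≤ v.length := by
      intro v hv hlen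
      exact hb (List.any_eq_true.mpr ⟨v, hv, by simpa using hlen⟩)
    have hcnil : cands = [] := by
      rw [hcands]
      have hfilter : g.items.filter (fun kv => decide (2 ≤ kv.2.length)) = [] := by
        rw [List.filter_eq_nil_iff]
        intro kv hkv
        have hv : kv.2 ∈ g.values := by
          simp only [PySem.Dict.values]
          exact List.mem_map_of_mem hkv
        simpa using hall kv.2 hv
      rw [hfilter, List.map_nil]
    have hfnone : (PySem.List.pyRange 1 N 1).reverse.find? (fun r => pvCondA wm (PySem.Int.toStr (r * r))) = none := by
      apply List.find?_eq_none.mpr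
      intro r _
      rw [hcondeq, hcnil]
      simp [pvCondB]
    rw [hfnone]
    have hIe : I = PySem.Dict.empty := by rw [hI, if_neg hb]
    have hstval : st = ((0 : Int), "") := by
      rcases pvOuterB_cases I ((0 : Int), "") g.items with h | ⟨rs, ⟨kv, _, _, hin, _⟩, heq⟩
      · exact h
      · rw [hIe] at hin
        simp [PySem.Dict.getD_empty] at hin
    rw [hstval]
    simp
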